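-- pv_equiv track=rewrite | github.com/pypi-data/pypi-mirror-149 | packages/ne-pretty/ne_pretty-0.0.7-py3-none-any.whl/ne_pretty/t.py | has_connected
-- ===== SOURCE A (Python) =====
-- def has_connected(pts):
--     tmp_pts = sorted(pts, key=lambda x: (x[0],x[1]), reverse=False)
--     length = len(tmp_pts)
--     i = 0
--     while i < length - 1:
--         s_pt = tmp_pts[i]
--         for j in range(i+1, length):
--             d_pt = tmp_pts[j]
--             if s_pt[1] + 1 == d_pt[0]:
--                 return True
--         i = i+1
--     return False
-- ===== SOURCE B (Python) =====
-- def has_connected(pts):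
--     seen = set()
--     for d in sorted(pts, key=lambda p: (p[0], p[1])):
--         if d[0] - 1 in seen:
--             return True
--         seen.add(d[1])
--     return False
-- ===== Notes on version B (the rewrite author's own statement) =====
-- stated objective: alternative
-- what changed: Replace A's all-later-pairs scan after sorting (quadratic in the worst case) by a single left-to-right pass over the sorted list that keeps a set of already-seen y-values and tests d[0]-1 for membership; intended as faster (measured 1.81x at the largest size, but not consistently >=1.5x since A often returns early), so claimed only as an alternative.
import Mathlib
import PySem

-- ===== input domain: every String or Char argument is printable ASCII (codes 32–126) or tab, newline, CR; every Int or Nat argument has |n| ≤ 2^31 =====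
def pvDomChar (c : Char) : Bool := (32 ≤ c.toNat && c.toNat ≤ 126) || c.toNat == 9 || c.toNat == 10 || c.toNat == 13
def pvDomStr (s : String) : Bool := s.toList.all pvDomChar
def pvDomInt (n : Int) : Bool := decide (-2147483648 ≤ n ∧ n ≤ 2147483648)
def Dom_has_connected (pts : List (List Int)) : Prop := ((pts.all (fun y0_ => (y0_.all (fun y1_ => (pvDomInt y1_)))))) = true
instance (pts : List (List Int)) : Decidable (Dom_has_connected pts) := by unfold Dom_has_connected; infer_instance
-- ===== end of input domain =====

-- ===== PORT A =====
-- B replaces A's pair scan over the sorted list by one pass keeping a set of seen y-values.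
-- `x[0]` / `x[1]` on a point of length ≥ 2 (guaranteed by Pre_): pyGetD with default 0 is exact there.
def pvGetX (p : List Int) : Int := PySem.List.pyGetD p 0 0
def pvGetY (p : List Int) : Int := PySem.List.pyGetD p 1 0

-- inner `for j in range(i+1, length)` of A, over the suffix after position i
def pvInnerA (s1 : Int) : List (List Int) → Bool
  | [] => false
  | d :: rest => if s1 + 1 = pvGetX d then true else pvInnerA s1 rest

-- outer `while i < length - 1` of A, structural recursion over the sorted list
def pvOuterA : List (List Int) → Bool
  | [] => false
  | s :: rest => if pvInnerA (pvGetY s) rest then true else pvOuterA rest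

def has_connected (pts : List (List Int)) : Bool :=
  pvOuterA (PySem.List.sorted2 pts pvGetX pvGetY)

-- ===== PORT B =====
def pvLoopB (seen : PySem.Set Int) : List (List Int) → Bool
  | [] => false
  | d :: rest =>
      if PySem.Set.contains seen (pvGetX d - 1) then true
      else pvLoopB (PySem.Set.add seen (pvGetY d)) rest

def has_connected_alt (pts : List (List Int)) : Bool :=
  pvLoopB PySem.Set.empty (PySem.List.sorted2 pts pvGetX pvGetY)

-- ===== PRECONDITION & SPEC =====
-- Pre_ excludes exactly the inputs where Python A raises IndexError: a point with fewer than 2 coordinates.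
def Pre_has_connected (pts : List (List Int)) : Prop := ∀ p ∈ pts, 2 ≤ p.length
instance (pts : List (List Int)) : Decidable (Pre_has_connected pts) := by unfold Pre_has_connected; infer_instance
def pvWitness_has_connected : List (List Int) := [[1, 2], [3, 4]]
def Spec_has_connected (pts : List (List Int)) (out : Bool) : Prop := out = has_connected_alt pts
instance (pts : List (List Int)) (out : Bool) : Decidable (Spec_has_connected pts out) := by unfold Spec_has_connected; infer_instance

-- ===== CLAIM (what is proved, stated in full; the proofs are below) =====
def Claim_equal_has_connected : Prop := ∀ (pts : List (List Int)), Dom_has_connected pts → Pre_has_connected pts → Spec_has_connected pts (has_connected pts)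

-- ===== LEMMAS AND PROOFS =====

theorem pvAnyOr {α : Type} (p q : α → Bool) (l : List α) :
    l.any (fun x => p x || q x) = (l.any p || l.any q) := by
  induction l with
  | nil => rfl
  | cons x t ih =>
      simp only [List.any_cons, ih]
      cases p x <;> cases q x <;> cases t.any p <;> cases t.any q <;> rfl

theorem pvInnerA_eq_any (s1 : Int) (l : List (List Int)) :
    pvInnerA s1 l = l.any (fun d => decide (pvGetX d - 1 = s1)) := by
  induction l with
  | nil => rfl
  | cons d rest ih =>
      simp only [pvInnerA, List.any_cons, ih]
      by_cases h : s1 + 1 = pvGetX d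
      · simp [h, show pvGetX d - 1 = s1 by omega]
      · simp [h, show ¬ (pvGetX d - 1 = s1) by omega]

theorem pvLoopB_eq (S : PySem.Set Int) (l : List (List Int)) :
    pvLoopB S l = (l.any (fun d => decide ((pvGetX d - 1) ∈ S)) || pvOuterA l) := by
  induction l generalizing S with
  | nil => rfl
  | cons d rest ih =>
      simp only [pvLoopB, pvOuterA, List.any_cons]
      by_cases h : (pvGetX d - 1) ∈ S
      · simp [(PySem.Set.contains_iff _ _).mpr h, h]
      · rw [if_neg (by simpa [PySem.Set.contains_iff] using h), ih]
        have hany : (rest.any fun e => decide ((pvGetX e - 1) ∈ PySem.Set.add S (pvGetY d)))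
            = (rest.any (fun e => decide ((pvGetX e - 1) ∈ S)) ||
               rest.any (fun e => decide (pvGetX e - 1 = pvGetY d))) := by
          have hpt : ∀ e : List Int,
              decide ((pvGetX e - 1) ∈ PySem.Set.add S (pvGetY d))
                = (decide ((pvGetX e - 1) ∈ S) || decide (pvGetX e - 1 = pvGetY d)) := by
            intro e; simp [PySem.Set.mem_add]
          simp only [hpt]
          exact pvAnyOr _ _ rest
        rw [hany, pvInnerA_eq_any]
        simp only [decide_eq_false h, Bool.false_or, Bool.or_assoc]
        cases rest.any (fun e => decide ((pvGetX e - 1) ∈ S)) <;>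
          cases rest.any (fun e => decide (pvGetX e - 1 = pvGetY d)) <;>
          cases pvOuterA rest <;> rfl

-- ===== VERDICT (by name: the statement is the Claim_ definition above) =====
theorem has_connected_spec : Claim_equal_has_connected := by
  intro pts _ _
  unfold Spec_has_connected has_connected has_connected_alt
  rw [pvLoopB_eq]
  simp [PySem.Set.empty]
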